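-- pv_equiv track=rewrite | github.com/bamdadd/lintel | packages/workflows/src/lintel/workflows/nodes/_stage_tracking.py | _pattern_matches
-- ===== SOURCE A (Python) =====
-- def _pattern_matches(pattern: str, event: str) -> bool:
--     """Match a notification rule pattern against an event string.
--
--     Supports: exact match, "*" (match all), "*.status", "stage.*".
--     """
--     if not pattern or pattern == "*":
--         return True
--     if pattern == event:
--         return True
--     # Wildcard matching: "*.succeeded" or "research.*"
--     p_parts = pattern.split(".")
--     e_parts = event.split(".")
--     if len(p_parts) != len(e_parts):
--         return False
--     return all(p == "*" or p == e for p, e in zip(p_parts, e_parts, strict=True))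
-- ===== SOURCE B (Python) =====
-- def _pattern_matches(pattern: str, event: str) -> bool:
--     """Match a notification rule pattern against an event string.
--
--     Streaming re-implementation: instead of splitting both strings into
--     segment lists and zipping, walk both strings one dotted segment at a
--     time with str.partition and stop at the first mismatch.
--     """
--     if not pattern or pattern == "*":
--         return True
--     p, e = pattern, event
--     while True:
--         p_seg, p_dot, p = p.partition(".")
--         e_seg, e_dot, e = e.partition(".")
--         if p_seg != "*" and p_seg != e_seg:
--             return False
--         if p_dot != e_dot:
--             return False
--         if not p_dot:
--             return True
-- ===== Notes on version B (the rewrite author's own statement) =====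
-- stated objective: alternative
-- what changed: B replaces A's split-both-strings-into-segment-lists + length check + zip/all comparison by a streaming loop that partitions both strings one dotted segment at a time with str.partition and exits at the first mismatching segment or dot.
import Mathlib
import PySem

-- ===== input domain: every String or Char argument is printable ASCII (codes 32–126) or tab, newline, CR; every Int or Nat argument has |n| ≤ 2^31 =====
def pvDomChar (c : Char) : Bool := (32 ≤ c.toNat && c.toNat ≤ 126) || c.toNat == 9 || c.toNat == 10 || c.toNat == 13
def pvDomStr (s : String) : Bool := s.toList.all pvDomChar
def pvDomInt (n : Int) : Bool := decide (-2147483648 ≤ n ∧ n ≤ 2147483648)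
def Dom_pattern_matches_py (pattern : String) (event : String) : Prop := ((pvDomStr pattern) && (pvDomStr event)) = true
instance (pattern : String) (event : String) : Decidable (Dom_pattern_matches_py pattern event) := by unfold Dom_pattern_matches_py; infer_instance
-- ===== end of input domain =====

-- B replaces A's split-both-strings-then-zip comparison by a streaming
-- one-segment-at-a-time partition loop with early exit (objective: alternative).

-- ===== PORT A =====
-- Python: guards, then p_parts = pattern.split("."); e_parts = event.split(".");
-- length check, then all(p == "*" or p == e for p, e in zip(p_parts, e_parts))
def pattern_matches_py (pattern : String) (event : String) : Bool :=
  if pattern = "" || pattern = "*" then true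
  else if pattern = event then true
  else
    let p_parts := PySem.Chars.splitOn pattern.toList ['.']
    let e_parts := PySem.Chars.splitOn event.toList ['.']
    if p_parts.length ≠ e_parts.length then false
    else (p_parts.zip e_parts).all (fun pe => decide (pe.1 = ['*']) || decide (pe.1 = pe.2))

-- ===== PORT B =====
-- one loop iteration of Source B: partition both strings at the first '.'
-- (takeWhile = head of partition, dropWhile = dot + rest), compare the
-- segments, return False on mismatched dots, recurse past the dots
def matchSegsB (p e : List Char) : Bool :=
  if p.takeWhile (· ≠ '.') ≠ ['*'] ∧ p.takeWhile (· ≠ '.') ≠ e.takeWhile (· ≠ '.') then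
    false
  else if p.dropWhile (· ≠ '.') = [] || e.dropWhile (· ≠ '.') = [] then
    decide (p.dropWhile (· ≠ '.') = []) && decide (e.dropWhile (· ≠ '.') = [])
  else
    matchSegsB (p.dropWhile (· ≠ '.')).tail (e.dropWhile (· ≠ '.')).tail
termination_by p.length
decreasing_by
  rename_i h
  simp only [Bool.or_eq_true, decide_eq_true_eq, not_or] at h
  have hle : (p.dropWhile (· ≠ '.')).length ≤ p.length := List.length_dropWhile_le _ _
  have hpos : 0 < (p.dropWhile (· ≠ '.')).length := List.length_pos_iff.mpr h.1
  simp only [List.length_tail]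
  omega

def pattern_matches_py_alt (pattern : String) (event : String) : Bool :=
  if pattern = "" || pattern = "*" then true
  else matchSegsB pattern.toList event.toList

-- ===== PRECONDITION & SPEC =====
def Spec_pattern_matches_py (pattern : String) (event : String) (out : Bool) : Prop := out = pattern_matches_py_alt pattern event
instance (pattern : String) (event : String) (out : Bool) : Decidable (Spec_pattern_matches_py pattern event out) := by unfold Spec_pattern_matches_py; infer_instance

-- ===== CLAIM (what is proved, stated in full; the proofs are below) =====
def Claim_equal_pattern_matches_py : Prop := ∀ (pattern : String) (event : String), Dom_pattern_matches_py pattern event → Spec_pattern_matches_py pattern event (pattern_matches_py pattern event)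

-- ===== LEMMAS AND PROOFS =====

-- recursive characterisation of splitting at '.'
def splitDot : List Char → List (List Char)
  | [] => [[]]
  | c :: cs => if c = '.' then [] :: splitDot cs else (splitDot cs).modifyHead (c :: ·)

theorem splitDot_ne_nil (l : List Char) : splitDot l ≠ [] := by
  cases l with
  | nil => simp [splitDot]
  | cons c cs =>
    simp only [splitDot]
    split
    · simp
    · cases h : splitDot cs with
      | nil => exact absurd h (splitDot_ne_nil cs)
      | cons a as => simp

theorem splitOn_go_spec (fuel : Nat) (l cur : List Char) (acc : List (List Char))
    (h : l.length ≤ fuel) :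
    PySem.Chars.splitOn.go ['.'] fuel l cur acc
      = acc.reverse ++ (splitDot l).modifyHead (cur.reverse ++ ·) := by
  induction fuel generalizing l cur acc with
  | zero =>
    have : l = [] := List.eq_nil_of_length_eq_zero (Nat.le_zero.mp h)
    subst this
    simp [PySem.Chars.splitOn.go, splitDot]
  | succ fuel ih =>
    cases l with
    | nil => simp [PySem.Chars.splitOn.go, splitDot]
    | cons c rest =>
      simp only [PySem.Chars.splitOn.go]
      by_cases hc : c = '.'
      · subst hc
        rw [if_pos (by simp [List.isPrefixOf])]
        have hdrop : List.drop ['.'].length ('.' :: rest) = rest := rfl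
        rw [hdrop, ih rest [] (cur.reverse :: acc) (by simpa using Nat.le_of_succ_le_succ h)]
        have hs : splitDot ('.' :: rest) = [] :: splitDot rest := by simp [splitDot]
        rw [hs]
        cases hr : splitDot rest with
        | nil => exact absurd hr (splitDot_ne_nil rest)
        | cons a as => simp
      · rw [if_neg (by simp [List.isPrefixOf]; intro heq; exact hc heq.symm)]
        rw [ih rest (c :: cur) acc (by simpa using Nat.le_of_succ_le_succ h)]
        have hsp : (splitDot (c :: rest)) = (splitDot rest).modifyHead (c :: ·) := by
          simp [splitDot, hc]
        rw [hsp]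
        cases hs : splitDot rest with
        | nil => exact absurd hs (splitDot_ne_nil rest)
        | cons a as => simp

theorem splitOn_eq_splitDot (l : List Char) :
    PySem.Chars.splitOn l ['.'] = splitDot l := by
  unfold PySem.Chars.splitOn
  rw [splitOn_go_spec (l.length + 1) l [] [] (Nat.le_succ _)]
  cases hs : splitDot l with
  | nil => exact absurd hs (splitDot_ne_nil l)
  | cons a as => simp

theorem splitDot_no_dot (p : List Char) (h : p.dropWhile (· ≠ '.') = []) :
    splitDot p = [p.takeWhile (· ≠ '.')] := by
  induction p with
  | nil => simp [splitDot]
  | cons c cs ih =>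
    by_cases hc : c = '.'
    · subst hc; simp [List.dropWhile] at h
    · simp only [List.dropWhile, hc, decide_not] at h
      simp only [splitDot, if_neg hc, List.takeWhile]
      rw [ih (by simpa using h)]
      simp [hc]

theorem splitDot_dot (p : List Char) (c : Char) (ps : List Char)
    (h : p.dropWhile (· ≠ '.') = c :: ps) :
    splitDot p = p.takeWhile (· ≠ '.') :: splitDot ps := by
  induction p with
  | nil => simp [List.dropWhile] at h
  | cons a cs ih =>
    by_cases hc : a = '.'
    · subst hc
      simp only [List.dropWhile, decide_not, ne_eq, decide_true, Bool.not_true] at h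
      obtain ⟨rfl, rfl⟩ := List.cons.inj h
      simp [splitDot, List.takeWhile]
    · simp only [List.dropWhile, hc, decide_not] at h
      simp only [splitDot, if_neg hc, List.takeWhile]
      rw [ih (by simpa using h)]
      simp [hc]

-- A's zip-all core, as a function of the two segment lists
def coreA (ps es : List (List Char)) : Bool :=
  if ps.length ≠ es.length then false
  else (ps.zip es).all (fun pe => decide (pe.1 = ['*']) || decide (pe.1 = pe.2))

theorem coreA_cons (a b : List Char) (as bs : List (List Char)) :
    coreA (a :: as) (b :: bs)
      = ((decide (a = ['*']) || decide (a = b)) && coreA as bs) := by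
  by_cases hl : as.length = bs.length
  · simp [coreA, hl]
  · simp [coreA, hl]

theorem coreA_nil_cons (b : List Char) (bs : List (List Char)) :
    coreA [] (b :: bs) = false := by simp [coreA]

theorem coreA_cons_nil (a : List Char) (as : List (List Char)) :
    coreA (a :: as) [] = false := by simp [coreA]

theorem matchSegsB_eq_coreA (p e : List Char) :
    matchSegsB p e = coreA (splitDot p) (splitDot e) := by
  rw [matchSegsB]
  by_cases hw : p.takeWhile (· ≠ '.') ≠ ['*'] ∧ p.takeWhile (· ≠ '.') ≠ e.takeWhile (· ≠ '.')
  · rw [if_pos hw]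
    have h1 : decide (p.takeWhile (· ≠ '.') = ['*']) = false := decide_eq_false hw.1
    have h2 : decide (p.takeWhile (· ≠ '.') = e.takeWhile (· ≠ '.')) = false :=
      decide_eq_false hw.2
    cases hp : p.dropWhile (· ≠ '.') with
    | nil =>
      rw [splitDot_no_dot p hp]
      cases he : e.dropWhile (· ≠ '.') with
      | nil =>
        rw [splitDot_no_dot e he, coreA_cons]
        simp only [h1, h2, Bool.or_self, Bool.false_and]
      | cons b es =>
        rw [splitDot_dot e b es he, coreA_cons]
        simp only [h1, h2, Bool.or_self, Bool.false_and]
    | cons c ps =>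
      rw [splitDot_dot p c ps hp]
      cases he : e.dropWhile (· ≠ '.') with
      | nil =>
        rw [splitDot_no_dot e he, coreA_cons]
        simp only [h1, h2, Bool.or_self, Bool.false_and]
      | cons b es =>
        rw [splitDot_dot e b es he, coreA_cons]
        simp only [h1, h2, Bool.or_self, Bool.false_and]
  · rw [if_neg hw]
    have hok : (decide (p.takeWhile (· ≠ '.') = ['*'])
        || decide (p.takeWhile (· ≠ '.') = e.takeWhile (· ≠ '.'))) = true := by
      rcases not_and_or.mp hw with h | h
      · rw [not_not] at h; rw [h]; simp
      · rw [not_not] at h; rw [h]; simp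
    cases hp : p.dropWhile (· ≠ '.') with
    | nil =>
      rw [splitDot_no_dot p hp]
      cases he : e.dropWhile (· ≠ '.') with
      | nil =>
        rw [splitDot_no_dot e he, coreA_cons, hok]
        simp [coreA]
      | cons b es =>
        rw [splitDot_dot e b es he, coreA_cons, hok]
        have hfalse : coreA ([] : List (List Char)) (splitDot es) = false := by
          cases hs : splitDot es with
          | nil => exact absurd hs (splitDot_ne_nil es)
          | cons x xs => exact coreA_nil_cons x xs
        simp [hfalse]
    | cons c ps =>
      rw [splitDot_dot p c ps hp]
      cases he : e.dropWhile (· ≠ '.') with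
      | nil =>
        rw [splitDot_no_dot e he, coreA_cons, hok]
        have hfalse : coreA (splitDot ps) ([] : List (List Char)) = false := by
          cases hs : splitDot ps with
          | nil => exact absurd hs (splitDot_ne_nil ps)
          | cons x xs => exact coreA_cons_nil x xs
        simp [hfalse]
      | cons b es =>
        rw [splitDot_dot e b es he, coreA_cons, hok]
        have ih := matchSegsB_eq_coreA ps es
        simp [ih]
termination_by p.length
decreasing_by
  have hle : (p.dropWhile (· ≠ '.')).length ≤ p.length := List.length_dropWhile_le _ _
  rw [hp] at hle
  simp only [List.length_cons] at hle
  omega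

theorem coreA_refl (ps : List (List Char)) : coreA ps ps = true := by
  induction ps with
  | nil => simp [coreA]
  | cons a as ih => rw [coreA_cons, ih]; simp

-- ===== VERDICT (by name: the statement is the Claim_ definition above) =====
theorem pattern_matches_py_spec : Claim_equal_pattern_matches_py := by
  intro pattern event _
  unfold Spec_pattern_matches_py pattern_matches_py pattern_matches_py_alt
  by_cases hg : (decide (pattern = "") || decide (pattern = "*")) = true
  · rw [if_pos hg, if_pos hg]
  · rw [if_neg hg, if_neg hg, matchSegsB_eq_coreA]
    by_cases heq : pattern = event
    · subst heq
      rw [if_pos rfl, coreA_refl]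
    · rw [if_neg heq]
      simp only [splitOn_eq_splitDot]
      rfl
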